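-- pv_equiv track=rewrite | github.com/davelindo/original_performance_takehome | optimizer.py | combine_tags
-- ===== SOURCE A (Python) =====
-- def combine_tags(tags):
--     tag = None
--     for t in tags:
--         if t is None:
--             continue
--         if tag is None:
--             tag = t
--         elif tag != t:
--             return None
--     return tag
-- ===== SOURCE B (Python) =====
-- def combine_tags(tags):
--     vals = [t for t in tags if t is not None]
--     if not vals:
--         return None
--     return vals[0] if all(v == vals[0] for v in vals[1:]) else None
-- ===== Notes on version B (the rewrite author's own statement) =====
-- stated objective: simpler
-- what changed: Replaces the stateful loop with early exit by a filter pass collecting the non-None tags followed by an all() uniformity check against the first one.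
import Mathlib
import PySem

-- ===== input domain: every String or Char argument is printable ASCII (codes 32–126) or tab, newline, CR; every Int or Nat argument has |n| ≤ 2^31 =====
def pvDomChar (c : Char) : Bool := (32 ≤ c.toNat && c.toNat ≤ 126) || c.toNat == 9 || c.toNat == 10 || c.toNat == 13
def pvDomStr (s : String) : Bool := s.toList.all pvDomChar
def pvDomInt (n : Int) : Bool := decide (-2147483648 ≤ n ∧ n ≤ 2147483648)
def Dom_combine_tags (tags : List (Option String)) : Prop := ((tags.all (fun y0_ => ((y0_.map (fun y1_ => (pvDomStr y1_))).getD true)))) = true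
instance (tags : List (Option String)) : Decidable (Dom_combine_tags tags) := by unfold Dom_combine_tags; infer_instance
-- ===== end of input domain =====

-- B rewrites the stateful early-exit loop as: collect the non-None tags, then check they are all equal to the first (same cost, simpler decomposition).


-- ===== PORT A =====
def combineLoop (tag : Option String) : List (Option String) → Option String
  | [] => tag
  | t :: ts =>
    match t with
    | none => combineLoop tag ts
    | some v =>
      match tag with
      | none => combineLoop (some v) ts
      | some g => if g ≠ v then none else combineLoop tag ts

def combine_tags (tags : List (Option String)) : Option String :=
  combineLoop none tags

-- ===== PORT B =====
-- B: collect non-None tags, then check uniformity against the first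
def combine_tags_alt (tags : List (Option String)) : Option String :=
  let vals := tags.filterMap id
  match vals with
  | [] => none
  | v0 :: rest => if rest.all (fun v => v == v0) then some v0 else none

-- ===== PRECONDITION & SPEC =====
def Spec_combine_tags (tags : List (Option String)) (out : Option String) : Prop := out = combine_tags_alt tags
instance (tags : List (Option String)) (out : Option String) : Decidable (Spec_combine_tags tags out) := by unfold Spec_combine_tags; infer_instance

-- ===== CLAIM (what is proved, stated in full; the proofs are below) =====
def Claim_equal_combine_tags : Prop := ∀ (tags : List (Option String)), Dom_combine_tags tags → Spec_combine_tags tags (combine_tags tags)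

-- ===== LEMMAS AND PROOFS =====

-- ===== VERDICT (by name: the statement is the Claim_ definition above) =====
lemma combineLoop_some (g : String) (ts : List (Option String)) :
    combineLoop (some g) ts =
      (if (ts.filterMap id).all (fun v => v == g) then some g else none) := by
  induction ts with
  | nil => simp [combineLoop]
  | cons t ts ih =>
    cases t with
    | none => simpa [combineLoop, List.filterMap] using ih
    | some v =>
      by_cases h : g = v
      · subst h
        simp [combineLoop, List.filterMap, ih]
      · simp [combineLoop, List.filterMap, h, Ne.symm h]

lemma combine_eq (tags : List (Option String)) :
    combine_tags tags = combine_tags_alt tags := by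
  unfold combine_tags combine_tags_alt
  induction tags with
  | nil => simp [combineLoop]
  | cons t ts ih =>
    cases t with
    | none => simpa [combineLoop, List.filterMap] using ih
    | some v => simp [combineLoop, List.filterMap, combineLoop_some]


theorem combine_tags_spec : Claim_equal_combine_tags := by
  intro tags _
  exact combine_eq tags
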